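-- pv_equiv track=rewrite | github.com/edward-dauvergne/relax | lib/text/table.py | _table_line
-- ===== SOURCE A (Python) =====
-- MULTI_COL = "@@MULTI@@"
--
-- def _table_line(text=None, widths=None, separator='   ', pad_left=' ', pad_right=' ', prefix=' ', postfix=' ', justification=None):
--     """Format a line of a table.
--
--     @keyword text:          The list of table elements.  If not given, an empty line will be be produced.
--     @type text:             list of str or None
--     @keyword widths:        The list of column widths for the table.
--     @type widths:           list of int
--     @keyword separator:     The column separation string.
--     @type separator:        str
--     @keyword pad_left:      The string to pad the left side of the table with.
--     @type pad_left:         str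
--     @keyword pad_right:     The string to pad the right side of the table with.
--     @type pad_right:        str
--     @keyword prefix:        The text to add to the start of the line.
--     @type prefix:           str
--     @keyword postfix:       The text to add to the end of the line.
--     @type postfix:          str
--     @keyword justification: The cell justification structure.  The elements should be 'l' for left justification and 'r' for right.
--     @type justification:    list of str
--     @return:                The table line.
--     @rtype:                 str
--     """
--
--     # Initialise.
--     line = prefix + pad_left
--     num_col = len(widths)
--
--     # Loop over the columns.
--     for i in range(num_col):
--         # Multicolumn (middle/end).
--         if text[i] == MULTI_COL:
--             continue
--
--         # The column separator.
--         if i > 0: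
--             line += separator
--
--         # Multicolumn (start).
--         if i < num_col-1 and text[i+1] == MULTI_COL:
--             # Find the full multicell width.
--             width = widths[i]
--             for j in range(i+1, num_col):
--                 if text[j] == MULTI_COL:
--                     width += len(separator) + widths[j]
--
--             # Add the padded text.
--             if justification[i] == 'l':
--                 line += text[i]
--             line += " " * (width - len(text[i]))
--             if justification[i] == 'r':
--                 line += text[i]
--
--         # Normal cell.
--         else:
--             if justification[i] == 'l':
--                 line += text[i]
--             line += " " * (widths[i] - len(text[i]))
--             if justification[i] == 'r':
--                 line += text[i]
--
--     # Close the line.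
--     line += pad_right + postfix + "\n"
--
--     # Return the text.
--     return line
-- ===== SOURCE B (Python) =====
-- MULTI_COL = "@@MULTI@@"
--
-- def _table_line(text=None, widths=None, separator='   ', pad_left=' ', pad_right=' ', prefix=' ', postfix=' ', justification=None):
--     """Single reverse pass: a running total 'run' of multicolumn widths replaces the inner rescans."""
--     num_col = len(widths)
--     parts = []
--     run = 0  # sum of len(separator) + widths[j] over the MULTI cells j already seen (to the right)
--     for i in range(num_col - 1, -1, -1):
--         t = text[i]
--         if t == MULTI_COL:
--             run += len(separator) + widths[i]
--             continue
--         width = widths[i]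
--         if i + 1 < num_col and text[i + 1] == MULTI_COL:
--             width += run
--         j = justification[i]
--         pad = " " * (width - len(t))
--         cell = t + pad if j == 'l' else pad + t if j == 'r' else pad
--         if i > 0:
--             cell = separator + cell
--         parts.append(cell)
--     return prefix + pad_left + "".join(reversed(parts)) + pad_right + postfix + "\n"
-- ===== Notes on version B (the rewrite author's own statement) =====
-- stated objective: alternative
-- what changed: A rescans all later columns inside the loop to total a multicolumn width; B makes a single reverse pass keeping a running total of multicolumn widths and joins collected cells, so the inner scan disappears.
import Mathlib
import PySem

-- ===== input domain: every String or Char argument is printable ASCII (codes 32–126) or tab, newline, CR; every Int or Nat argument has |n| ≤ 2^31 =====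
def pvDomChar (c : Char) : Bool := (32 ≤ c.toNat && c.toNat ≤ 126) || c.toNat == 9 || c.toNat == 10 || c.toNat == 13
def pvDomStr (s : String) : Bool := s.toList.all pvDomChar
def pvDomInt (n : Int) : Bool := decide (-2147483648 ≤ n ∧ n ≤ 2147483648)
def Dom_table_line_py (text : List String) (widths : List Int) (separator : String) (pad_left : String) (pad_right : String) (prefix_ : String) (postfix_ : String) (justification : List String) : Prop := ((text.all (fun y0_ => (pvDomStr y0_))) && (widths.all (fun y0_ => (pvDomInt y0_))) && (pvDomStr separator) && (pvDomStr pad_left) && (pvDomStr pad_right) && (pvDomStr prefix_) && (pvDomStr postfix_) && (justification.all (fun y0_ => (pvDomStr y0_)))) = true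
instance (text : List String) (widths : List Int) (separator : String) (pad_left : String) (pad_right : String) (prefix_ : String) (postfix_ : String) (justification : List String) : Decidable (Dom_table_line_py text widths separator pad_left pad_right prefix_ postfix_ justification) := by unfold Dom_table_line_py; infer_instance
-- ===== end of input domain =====

-- B replaces A's inner rescan of later columns by a single reverse pass with a running
-- multicolumn-width total (objective: alternative); return values proved equal on Pre_.


-- ===== PORT A =====
-- MULTI_COL = "@@MULTI@@"  (cell strings are compared as their character lists)
def pvMULTI : List Char := "@@MULTI@@".toList

-- A's inner loop: `for j in range(start, num_col): if text[j] == MULTI_COL: width += len(separator) + widths[j]`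
def pvAInner (tC : List (List Char)) (sC : List Char) (widths : List Int) (num_col start : Int) (init : Int) : Int :=
  (PySem.List.pyRange start num_col 1).foldl (fun width j =>
    if PySem.List.pyGetD tC j [] = pvMULTI then width + (sC.length : Int) + PySem.List.pyGetD widths j 0
    else width) init

-- one iteration of A's `for i in range(num_col)` loop, accumulating the line
def pvAStep (tC : List (List Char)) (sC : List Char) (jC : List (List Char)) (widths : List Int) (num_col : Int) (line : List Char) (i : Int) : List Char :=
  if PySem.List.pyGetD tC i [] = pvMULTI then line
  else
    let line := if i > 0 then line ++ sC else line
    if i < num_col - 1 ∧ PySem.List.pyGetD tC (i + 1) [] = pvMULTI then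
      let width := pvAInner tC sC widths num_col (i + 1) (PySem.List.pyGetD widths i 0)
      let t := PySem.List.pyGetD tC i []
      let line := if PySem.List.pyGetD jC i [] = ['l'] then line ++ t else line
      let line := line ++ List.replicate (width - (t.length : Int)).toNat ' '
      if PySem.List.pyGetD jC i [] = ['r'] then line ++ t else line
    else
      let t := PySem.List.pyGetD tC i []
      let line := if PySem.List.pyGetD jC i [] = ['l'] then line ++ t else line
      let line := line ++ List.replicate (PySem.List.pyGetD widths i 0 - (t.length : Int)).toNat ' '
      if PySem.List.pyGetD jC i [] = ['r'] then line ++ t else line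

def table_line_py (text : List String) (widths : List Int) (separator : String) (pad_left : String) (pad_right : String) (prefix_ : String) (postfix_ : String) (justification : List String) : String :=
  let tC := text.map String.toList
  let sC := separator.toList
  let jC := justification.map String.toList
  let num_col : Int := (widths.length : Int)
  let line := (PySem.List.pyRange 0 num_col 1).foldl (pvAStep tC sC jC widths num_col)
    (prefix_.toList ++ pad_left.toList)
  String.ofList (line ++ pad_right.toList ++ postfix_.toList ++ ['\n'])

-- ===== PORT B =====
-- one iteration of B's `for i in range(num_col-1, -1, -1)` loop; state = (run, parts)
def pvBStep (tC : List (List Char)) (sC : List Char) (jC : List (List Char)) (widths : List Int) (num_col : Int) (st : Int × List (List Char)) (i : Int) : Int × List (List Char) :=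
  let t := PySem.List.pyGetD tC i []
  if t = pvMULTI then (st.1 + (sC.length : Int) + PySem.List.pyGetD widths i 0, st.2)
  else
    let width := PySem.List.pyGetD widths i 0 +
      (if i + 1 < num_col ∧ PySem.List.pyGetD tC (i + 1) [] = pvMULTI then st.1 else 0)
    let j := PySem.List.pyGetD jC i []
    let pad := List.replicate (width - (t.length : Int)).toNat ' '
    let cell := if j = ['l'] then t ++ pad else if j = ['r'] then pad ++ t else pad
    let cell := if i > 0 then sC ++ cell else cell
    (st.1, st.2 ++ [cell])

def table_line_py_alt (text : List String) (widths : List Int) (separator : String) (pad_left : String) (pad_right : String) (prefix_ : String) (postfix_ : String) (justification : List String) : String :=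
  let tC := text.map String.toList
  let sC := separator.toList
  let jC := justification.map String.toList
  let num_col : Int := (widths.length : Int)
  let st := (PySem.List.pyRange (num_col - 1) (-1) (-1)).foldl (pvBStep tC sC jC widths num_col) (0, [])
  String.ofList (prefix_.toList ++ pad_left.toList ++ st.2.reverse.flatten ++ pad_right.toList ++ postfix_.toList ++ ['\n'])

-- ===== PRECONDITION & SPEC =====
-- Pre_ excludes exactly the IndexError inputs: text shorter than widths, or justification lacking
-- an index i at which a non-multicolumn cell is formatted.
def Pre_table_line_py (text : List String) (widths : List Int) (separator : String) (pad_left : String) (pad_right : String) (prefix_ : String) (postfix_ : String) (justification : List String) : Prop :=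
  widths.length ≤ text.length ∧
  ∀ i < widths.length, text.getD i "" ≠ "@@MULTI@@" → i < justification.length
instance (text : List String) (widths : List Int) (separator : String) (pad_left : String) (pad_right : String) (prefix_ : String) (postfix_ : String) (justification : List String) : Decidable (Pre_table_line_py text widths separator pad_left pad_right prefix_ postfix_ justification) := by unfold Pre_table_line_py; infer_instance
def pvWitness_table_line_py : List String × List Int × String × String × String × String × String × List String :=
  (["ab", "c"], [4, 3], "   ", " ", " ", " ", " ", ["l", "r"])

def Spec_table_line_py (text : List String) (widths : List Int) (separator : String) (pad_left : String) (pad_right : String) (prefix_ : String) (postfix_ : String) (justification : List String) (out : String) : Prop := out = table_line_py_alt text widths separator pad_left pad_right prefix_ postfix_ justification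
instance (text : List String) (widths : List Int) (separator : String) (pad_left : String) (pad_right : String) (prefix_ : String) (postfix_ : String) (justification : List String) (out : String) : Decidable (Spec_table_line_py text widths separator pad_left pad_right prefix_ postfix_ justification out) := by unfold Spec_table_line_py; infer_instance

-- ===== CLAIM (what is proved, stated in full; the proofs are below) =====
def Claim_equal_table_line_py : Prop := ∀ (text : List String) (widths : List Int) (separator : String) (pad_left : String) (pad_right : String) (prefix_ : String) (postfix_ : String) (justification : List String), Dom_table_line_py text widths separator pad_left pad_right prefix_ postfix_ justification → Pre_table_line_py text widths separator pad_left pad_right prefix_ postfix_ justification → Spec_table_line_py text widths separator pad_left pad_right prefix_ postfix_ justification (table_line_py text widths separator pad_left pad_right prefix_ postfix_ justification)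

-- ===== LEMMAS AND PROOFS =====

-- suffix total of multicolumn widths from index k on (what A's inner loop sums and B's `run` carries)
def pvR (tC : List (List Char)) (sC : List Char) (widths : List Int) (k : Nat) : Int :=
  if _h : k < widths.length then
    (if PySem.List.pyGetD tC (k : Int) [] = pvMULTI then (sC.length : Int) + PySem.List.pyGetD widths (k : Int) 0 else 0)
      + pvR tC sC widths (k + 1)
  else 0
termination_by widths.length - k

-- the characters both programs emit for a (non-multicolumn) column i, separator included
def pvCell (tC : List (List Char)) (sC : List Char) (jC : List (List Char)) (widths : List Int) (i : Nat) : List Char :=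
  let t := PySem.List.pyGetD tC (i : Int) []
  let width := PySem.List.pyGetD widths (i : Int) 0 +
    (if (i : Int) + 1 < (widths.length : Int) ∧ PySem.List.pyGetD tC ((i : Int) + 1) [] = pvMULTI
     then pvR tC sC widths (i + 1) else 0)
  let pad := List.replicate (width - (t.length : Int)).toNat ' '
  let cell := if PySem.List.pyGetD jC (i : Int) [] = ['l'] then t ++ pad
              else if PySem.List.pyGetD jC (i : Int) [] = ['r'] then pad ++ t else pad
  if (i : Int) > 0 then sC ++ cell else cell

def pvPieces (tC : List (List Char)) (sC : List Char) (jC : List (List Char)) (widths : List Int) (k : Nat) : List Char :=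
  if _h : k < widths.length then
    (if PySem.List.pyGetD tC (k : Int) [] = pvMULTI then [] else pvCell tC sC jC widths k)
      ++ pvPieces tC sC jC widths (k + 1)
  else []
termination_by widths.length - k

-- B's `parts` after processing indices k-1 … 0 (in that order)
def pvRev (tC : List (List Char)) (sC : List Char) (jC : List (List Char)) (widths : List Int) : Nat → List (List Char)
  | 0 => []
  | k + 1 => (if PySem.List.pyGetD tC (k : Int) [] = pvMULTI then [] else [pvCell tC sC jC widths k])
      ++ pvRev tC sC jC widths k

lemma pvR_stop (tC : List (List Char)) (sC : List Char) (widths : List Int) : pvR tC sC widths widths.length = 0 := by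
  rw [pvR]; simp

lemma pvPieces_stop (tC : List (List Char)) (sC : List Char) (jC : List (List Char)) (widths : List Int) :
    pvPieces tC sC jC widths widths.length = [] := by
  rw [pvPieces]; simp

lemma pvTail (line1 t pad : List Char) (j : List Char) :
    (if j = ['r'] then ((if j = ['l'] then line1 ++ t else line1) ++ pad) ++ t
     else (if j = ['l'] then line1 ++ t else line1) ++ pad)
      = line1 ++ (if j = ['l'] then t ++ pad else if j = ['r'] then pad ++ t else pad) := by
  by_cases hl : j = ['l']
  · subst hl; simp
  · by_cases hr : j = ['r']
    · subst hr; simp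
    · simp [hl, hr]

lemma pvAInner_eq (tC : List (List Char)) (sC : List Char) (widths : List Int) :
    ∀ (m k : Nat), widths.length - k = m → k ≤ widths.length → ∀ c,
      pvAInner tC sC widths (widths.length : Int) (k : Int) c = c + pvR tC sC widths k := by
  intro m
  induction m with
  | zero =>
    intro k hm hk c
    have hkn : k = widths.length := by omega
    subst hkn
    rw [pvAInner, PySem.List.pyRange_one_eq_nil (by omega), pvR_stop]
    simp
  | succ m ih =>
    intro k hm hk c
    have hklt : k < widths.length := by omega
    rw [pvAInner, PySem.List.pyRange_one_cons (by exact_mod_cast hklt)]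
    have hcast : (k : Int) + 1 = ((k + 1 : Nat) : Int) := by push_cast; ring
    rw [List.foldl_cons, hcast]
    have step : (if PySem.List.pyGetD tC (k : Int) [] = pvMULTI then c + (sC.length : Int) + PySem.List.pyGetD widths (k : Int) 0 else c)
        = c + (if PySem.List.pyGetD tC (k : Int) [] = pvMULTI then (sC.length : Int) + PySem.List.pyGetD widths (k : Int) 0 else 0) := by
      split <;> ring
    have := ih (k + 1) (by omega) (by omega)
      (if PySem.List.pyGetD tC (k : Int) [] = pvMULTI then c + (sC.length : Int) + PySem.List.pyGetD widths (k : Int) 0 else c)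
    rw [pvAInner] at this
    rw [this, step]
    conv_rhs => rw [pvR]
    rw [dif_pos hklt]
    ring

lemma pvAStep_eq (tC : List (List Char)) (sC : List Char) (jC : List (List Char)) (widths : List Int)
    (k : Nat) (acc : List Char) :
    pvAStep tC sC jC widths (widths.length : Int) acc (k : Int)
      = acc ++ (if PySem.List.pyGetD tC (k : Int) [] = pvMULTI then [] else pvCell tC sC jC widths k) := by
  simp only [pvAStep, pvCell]
  by_cases hM : PySem.List.pyGetD tC (k : Int) [] = pvMULTI
  · simp [hM]
  · rw [if_neg hM, if_neg hM]
    have hcond : ((k : Int) < (widths.length : Int) - 1 ∧ PySem.List.pyGetD tC ((k : Int) + 1) [] = pvMULTI)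
        ↔ ((k : Int) + 1 < (widths.length : Int) ∧ PySem.List.pyGetD tC ((k : Int) + 1) [] = pvMULTI) := by
      constructor <;> (rintro ⟨h1, h2⟩; exact ⟨by omega, h2⟩)
    have hcast : (k : Int) + 1 = ((k + 1 : Nat) : Int) := by push_cast; ring
    by_cases hmc : (k : Int) + 1 < (widths.length : Int) ∧ PySem.List.pyGetD tC ((k : Int) + 1) [] = pvMULTI
    · rw [if_pos (hcond.mpr hmc), if_pos hmc, hcast,
        pvAInner_eq tC sC widths (widths.length - (k + 1)) (k + 1) rfl (by omega), pvTail]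
      by_cases h0 : 0 < k <;> simp [h0, List.append_assoc]
    · rw [if_neg (fun h => hmc (hcond.mp h)), if_neg hmc, add_zero, pvTail]
      by_cases h0 : 0 < k <;> simp [h0, List.append_assoc]

lemma pvA_outer (tC : List (List Char)) (sC : List Char) (jC : List (List Char)) (widths : List Int) :
    ∀ (m k : Nat), widths.length - k = m → k ≤ widths.length → ∀ acc,
      (PySem.List.pyRange (k : Int) (widths.length : Int) 1).foldl (pvAStep tC sC jC widths (widths.length : Int)) acc
        = acc ++ pvPieces tC sC jC widths k := by
  intro m
  induction m with
  | zero =>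
    intro k hm hk acc
    have hkn : k = widths.length := by omega
    subst hkn
    rw [PySem.List.pyRange_one_eq_nil (by omega), pvPieces_stop]
    simp
  | succ m ih =>
    intro k hm hk acc
    have hklt : k < widths.length := by omega
    rw [PySem.List.pyRange_one_cons (by exact_mod_cast hklt), List.foldl_cons,
      pvAStep_eq tC sC jC widths k acc]
    have hcast : (k : Int) + 1 = ((k + 1 : Nat) : Int) := by push_cast; ring
    rw [hcast, ih (k + 1) (by omega) (by omega)]
    conv_rhs => rw [pvPieces]
    rw [dif_pos hklt]
    simp [List.append_assoc]

lemma pvB_loop (tC : List (List Char)) (sC : List Char) (jC : List (List Char)) (widths : List Int) :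
    ∀ (k : Nat), k ≤ widths.length → ∀ parts,
      (PySem.List.pyRange ((k : Int) - 1) (-1) (-1)).foldl (pvBStep tC sC jC widths (widths.length : Int)) (pvR tC sC widths k, parts)
        = (pvR tC sC widths 0, parts ++ pvRev tC sC jC widths k) := by
  intro k
  induction k with
  | zero =>
    intro _ parts
    rw [PySem.List.pyRange_neg_one_eq_nil (by norm_num)]
    simp [pvRev]
  | succ k ih =>
    intro hk parts
    have hcast : ((k + 1 : Nat) : Int) - 1 = (k : Int) := by push_cast; ring
    rw [hcast, PySem.List.pyRange_neg_one_cons (by omega), List.foldl_cons]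
    have hstep : pvBStep tC sC jC widths (widths.length : Int) (pvR tC sC widths (k + 1), parts) (k : Int)
        = if PySem.List.pyGetD tC (k : Int) [] = pvMULTI
          then (pvR tC sC widths k, parts)
          else (pvR tC sC widths k, parts ++ [pvCell tC sC jC widths k]) := by
      by_cases hM : PySem.List.pyGetD tC (k : Int) [] = pvMULTI
      · have hRk : pvR tC sC widths k
            = pvR tC sC widths (k + 1) + (sC.length : Int) + PySem.List.pyGetD widths (k : Int) 0 := by
          rw [pvR, dif_pos (by omega : k < widths.length), if_pos hM]; ring
        simp only [pvBStep]
        rw [if_pos hM, hRk, if_pos hM]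
      · have hR : pvR tC sC widths k = pvR tC sC widths (k + 1) := by
          rw [pvR, dif_pos (by omega : k < widths.length), if_neg hM]; ring
        simp only [pvBStep, pvCell]
        rw [if_neg hM, hR, if_neg hM]
    rw [hstep]
    by_cases hM : PySem.List.pyGetD tC (k : Int) [] = pvMULTI
    · rw [if_pos hM, ih (by omega) parts, pvRev, if_pos hM]
      simp
    · rw [if_neg hM, ih (by omega) (parts ++ [pvCell tC sC jC widths k]), pvRev, if_neg hM]
      simp

lemma pvRev_flatten (tC : List (List Char)) (sC : List Char) (jC : List (List Char)) (widths : List Int) :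
    ∀ k, k ≤ widths.length →
      (pvRev tC sC jC widths k).reverse.flatten ++ pvPieces tC sC jC widths k
        = pvPieces tC sC jC widths 0 := by
  intro k
  induction k with
  | zero => intro _; simp [pvRev]
  | succ k ih =>
    intro hk
    have hpk : pvPieces tC sC jC widths k
        = (if PySem.List.pyGetD tC (k : Int) [] = pvMULTI then [] else pvCell tC sC jC widths k)
          ++ pvPieces tC sC jC widths (k + 1) := by
      conv_lhs => rw [pvPieces]
      rw [dif_pos (by omega : k < widths.length)]
    rw [pvRev]
    by_cases hM : PySem.List.pyGetD tC (k : Int) [] = pvMULTI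
    · rw [if_pos hM]
      have := ih (by omega)
      rw [hpk, if_pos hM] at this
      simpa using this
    · rw [if_neg hM]
      have := ih (by omega)
      rw [hpk, if_neg hM] at this
      rw [← this]
      simp [List.append_assoc]

-- ===== VERDICT (by name: the statement is the Claim_ definition above) =====
theorem table_line_py_spec : Claim_equal_table_line_py := by
  intro text widths separator pad_left pad_right prefix_ postfix_ justification _ _
  unfold Spec_table_line_py
  simp only [table_line_py, table_line_py_alt]
  set tC := text.map String.toList
  set sC := separator.toList
  set jC := justification.map String.toList
  have hA := pvA_outer tC sC jC widths widths.length 0 (by omega) (by omega)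
    (prefix_.toList ++ pad_left.toList)
  simp only [Nat.cast_zero] at hA
  have hB := pvB_loop tC sC jC widths widths.length (le_refl _) []
  rw [pvR_stop] at hB
  have hflat : (pvRev tC sC jC widths widths.length).reverse.flatten = pvPieces tC sC jC widths 0 := by
    have := pvRev_flatten tC sC jC widths widths.length (le_refl _)
    rwa [pvPieces_stop, List.append_nil] at this
  rw [hA, hB]
  simp [hflat, List.append_assoc]
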